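-- pv_equiv track=rewrite | github.com/malvikamodi/Emulating-Downward-Spiral-Effect | client_categarization.py | select_playback_bitrate
-- ===== SOURCE A (Python) =====
-- def select_playback_bitrate(throughput_bitps, optimistic = False):
--
--     rates_kbitps = [235,   375,    560,     750,    1050,   1400, 1750]
--     rates_bitps = [ x* 1024 for x in rates_kbitps]
--
--     if not optimistic:
--         if throughput_bitps > (2500 * 1024):
--             bit_rate = rates_bitps[6] # 1750*1024 bits/s
--         elif throughput_bitps > (2150 * 1024):
--             bit_rate = rates_bitps[5] # 1400*1024 bits/s
--         elif throughput_bitps > (1300 * 1024):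
--             bit_rate = rates_bitps[4] # 1050*1024 kbits/s
--         elif throughput_bitps > (1100 * 1024):
--             bit_rate = rates_bitps[3] # 750*1024 bits/s
--         elif throughput_bitps > (740 * 1024):
--             bit_rate = rates_bitps[2] # 560*1024 bits/s
--         elif throughput_bitps > (500 * 1024):
--             bit_rate = rates_bitps[1] # 375*1024 bits/s
--         else:
--             bit_rate = rates_bitps[0]   # 235*1024 bits/s
--     else:
--         if throughput_bitps > (1750 * 1024):
--             bit_rate = rates_bitps[6] # 1750*1024 bits/s
--         elif throughput_bitps > (1400 * 1024):
--             bit_rate = rates_bitps[5] # 1400*1024 bits/s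
--         elif throughput_bitps > (1050 * 1024):
--             bit_rate = rates_bitps[4] # 1050*1024 kbits/s
--         elif throughput_bitps > (750 * 1024):
--             bit_rate = rates_bitps[3] # 750*1024 bits/s
--         elif throughput_bitps > (560 * 1024):
--             bit_rate = rates_bitps[2] # 560*1024 bits/s
--         elif throughput_bitps > (375 * 1024):
--             bit_rate = rates_bitps[1] # 375*1024 bits/s
--         else:
--             bit_rate = rates_bitps[0]   # 235*1024 bits/s
--
--     return bit_rate
-- ===== SOURCE B (Python) =====
-- RATES_KBITPS = [235, 375, 560, 750, 1050, 1400, 1750]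
-- BOUNDS_KBITPS = [500, 740, 1100, 1300, 2150, 2500]
-- OPT_BOUNDS_KBITPS = [375, 560, 750, 1050, 1400, 1750]
--
-- def select_playback_bitrate(throughput_bitps, optimistic = False):
--     bounds = OPT_BOUNDS_KBITPS if optimistic else BOUNDS_KBITPS
--     idx = sum(1 for b in bounds if throughput_bitps > b * 1024)
--     return RATES_KBITPS[idx] * 1024
-- ===== Notes on version B (the rewrite author's own statement) =====
-- stated objective: idiomatic
-- what changed: Replaces the two seven-branch if/elif cascades with a data-driven table: count how many ascending boundary throughputs are exceeded and index the rate table with that count.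
import Mathlib
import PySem

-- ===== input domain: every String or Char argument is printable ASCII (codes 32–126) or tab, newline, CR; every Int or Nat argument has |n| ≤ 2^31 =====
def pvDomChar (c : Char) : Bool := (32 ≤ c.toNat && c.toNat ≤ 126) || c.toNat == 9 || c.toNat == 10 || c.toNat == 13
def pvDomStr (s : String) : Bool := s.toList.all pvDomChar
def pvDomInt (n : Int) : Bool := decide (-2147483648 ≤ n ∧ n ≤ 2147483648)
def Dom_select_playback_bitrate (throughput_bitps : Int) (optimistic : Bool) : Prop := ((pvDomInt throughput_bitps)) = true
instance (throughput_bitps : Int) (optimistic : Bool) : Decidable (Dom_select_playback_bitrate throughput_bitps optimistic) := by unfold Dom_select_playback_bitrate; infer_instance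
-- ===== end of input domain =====

-- B replaces the two if/elif cascades with a boundary table: count the boundaries exceeded, index the rate table (idiomatic, same cost).
-- ===== PORT A =====
def select_playback_bitrate (throughput_bitps : Int) (optimistic : Bool) : Int :=
  let rates_kbitps : List Int := [235, 375, 560, 750, 1050, 1400, 1750]
  let rates_bitps : List Int := rates_kbitps.map (fun x => x * 1024)
  let bit_rate : Int :=
    if !optimistic then
      if throughput_bitps > 2500 * 1024 then (PySem.List.pyGet? rates_bitps 6).getD 0
      else if throughput_bitps > 2150 * 1024 then (PySem.List.pyGet? rates_bitps 5).getD 0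
      else if throughput_bitps > 1300 * 1024 then (PySem.List.pyGet? rates_bitps 4).getD 0
      else if throughput_bitps > 1100 * 1024 then (PySem.List.pyGet? rates_bitps 3).getD 0
      else if throughput_bitps > 740 * 1024 then (PySem.List.pyGet? rates_bitps 2).getD 0
      else if throughput_bitps > 500 * 1024 then (PySem.List.pyGet? rates_bitps 1).getD 0
      else (PySem.List.pyGet? rates_bitps 0).getD 0
    else
      if throughput_bitps > 1750 * 1024 then (PySem.List.pyGet? rates_bitps 6).getD 0
      else if throughput_bitps > 1400 * 1024 then (PySem.List.pyGet? rates_bitps 5).getD 0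
      else if throughput_bitps > 1050 * 1024 then (PySem.List.pyGet? rates_bitps 4).getD 0
      else if throughput_bitps > 750 * 1024 then (PySem.List.pyGet? rates_bitps 3).getD 0
      else if throughput_bitps > 560 * 1024 then (PySem.List.pyGet? rates_bitps 2).getD 0
      else if throughput_bitps > 375 * 1024 then (PySem.List.pyGet? rates_bitps 1).getD 0
      else (PySem.List.pyGet? rates_bitps 0).getD 0
  bit_rate

-- ===== PORT B =====
def pvRatesKbitps : List Int := [235, 375, 560, 750, 1050, 1400, 1750]
def pvBoundsKbitps : List Int := [500, 740, 1100, 1300, 2150, 2500]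
def pvOptBoundsKbitps : List Int := [375, 560, 750, 1050, 1400, 1750]

def select_playback_bitrate_alt (throughput_bitps : Int) (optimistic : Bool) : Int :=
  let bounds := if optimistic then pvOptBoundsKbitps else pvBoundsKbitps
  -- sum(1 for b in bounds if throughput > b*1024) = countP (sum_map_ite_one_zero)
  let idx : Nat := bounds.countP (fun b => throughput_bitps > b * 1024)
  (PySem.List.pyGet? pvRatesKbitps (idx : Int)).getD 0 * 1024

-- ===== PRECONDITION & SPEC =====
def Spec_select_playback_bitrate (throughput_bitps : Int) (optimistic : Bool) (out : Int) : Prop := out = select_playback_bitrate_alt throughput_bitps optimistic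
instance (throughput_bitps : Int) (optimistic : Bool) (out : Int) : Decidable (Spec_select_playback_bitrate throughput_bitps optimistic out) := by unfold Spec_select_playback_bitrate; infer_instance

-- ===== CLAIM (what is proved, stated in full; the proofs are below) =====
def Claim_equal_select_playback_bitrate : Prop := ∀ (throughput_bitps : Int) (optimistic : Bool), Dom_select_playback_bitrate throughput_bitps optimistic → Spec_select_playback_bitrate throughput_bitps optimistic (select_playback_bitrate throughput_bitps optimistic)

-- ===== LEMMAS AND PROOFS =====

-- ===== VERDICT (by name: the statement is the Claim_ definition above) =====
theorem select_playback_bitrate_spec : Claim_equal_select_playback_bitrate := by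
  intro t o _
  unfold Spec_select_playback_bitrate select_playback_bitrate select_playback_bitrate_alt
  cases o <;>
  simp only [pvRatesKbitps, pvBoundsKbitps, pvOptBoundsKbitps, List.countP_cons, List.countP_nil,
      Bool.not_false, Bool.not_true, if_true, List.map, gt_iff_lt, decide_eq_true_eq,
      Bool.false_eq_true, if_false] <;>
  split_ifs <;> first | rfl | omega
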